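-- pv_equiv track=rewrite | github.com/cyanjnpr/karMtka | src/packet/text.py | new_line_positions
-- ===== SOURCE A (Python) =====
-- from typing import List
--
-- def new_line_positions(lines: List[str], translate_by: int = 0):
--     pos = []
--     i = max(translate_by, 0)
--     for line in lines:
--         previous_ch = ''
--         for ch in line:
--             if ch == '\n' and previous_ch != '\n':
--                 pos.append(i)
--             i += 1
--             previous_ch = ch
--     return pos
-- ===== SOURCE B (Python) =====
-- from typing import List
--
-- def new_line_positions(lines: List[str], translate_by: int = 0):
--     pos = []
--     base = max(translate_by, 0)
--     for line in lines:
--         parts = line.split('\n')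
--         first, rest = parts[0], parts[1:]
--         if rest:
--             off = base + len(first)
--             pos.append(off)
--             for part in rest[:-1]:
--                 off += 1 + len(part)
--                 if part:
--                     pos.append(off)
--         base += len(line)
--     return pos
-- ===== Notes on version B (the rewrite author's own statement) =====
-- stated objective: alternative
-- what changed: Replaces A's per-character scan with previous_ch state by splitting each line on '\n' and doing offset arithmetic over the parts: the first newline of a line always counts, and a later newline counts iff the part before it is nonempty.
import Mathlib
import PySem

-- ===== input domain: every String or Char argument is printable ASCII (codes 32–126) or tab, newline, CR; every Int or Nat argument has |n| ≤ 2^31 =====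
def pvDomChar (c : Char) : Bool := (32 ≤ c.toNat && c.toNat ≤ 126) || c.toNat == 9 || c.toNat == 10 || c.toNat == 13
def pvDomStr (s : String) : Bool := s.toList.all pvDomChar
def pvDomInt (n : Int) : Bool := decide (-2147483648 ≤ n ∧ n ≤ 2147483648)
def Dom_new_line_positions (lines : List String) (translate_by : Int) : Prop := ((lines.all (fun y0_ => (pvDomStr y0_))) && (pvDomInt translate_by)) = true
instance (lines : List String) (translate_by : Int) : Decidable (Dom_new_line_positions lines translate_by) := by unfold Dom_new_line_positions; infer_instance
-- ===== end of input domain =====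

-- B replaces A's per-character scan with previous_ch state by splitting each line on '\n' and
-- doing offset arithmetic over the parts (first newline always counts; a later one counts iff
-- the part before it is nonempty); same cost, a genuinely different decomposition.

-- ===== PORT A =====
-- state: (pos, i, previous_ch); previous_ch = '' is modelled as none
def new_line_positions (lines : List String) (translate_by : Int) : List Int :=
  (lines.foldl
    (fun (st : List Int × Int) line =>
      let inner := line.toList.foldl
        (fun (st2 : List Int × Int × Option Char) ch =>
          let pos := if ch = '\n' ∧ st2.2.2 ≠ some '\n' then st2.1 ++ [st2.2.1] else st2.1
          (pos, st2.2.1 + 1, some ch))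
        (st.1, st.2, none)
      (inner.1, inner.2.1))
    ([], max translate_by 0)).1

-- ===== PORT B =====
-- parts = line.split('\n'); first, rest = parts[0], parts[1:]; parts is never empty in Python,
-- so the [] branch is unreachable (it only makes the match total).
def new_line_positions_alt (lines : List String) (translate_by : Int) : List Int :=
  (lines.foldl
    (fun (st : List Int × Int) line =>
      let cs := line.toList
      match PySem.Chars.splitOn cs ['\n'] with
      | [] => (st.1, st.2 + (cs.length : Int))
      | first :: rest =>
        if rest = [] then (st.1, st.2 + (cs.length : Int))
        else
          let off0 := st.2 + (first.length : Int)
          let inner := rest.dropLast.foldl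
            (fun (st2 : List Int × Int) part =>
              let off := st2.2 + 1 + (part.length : Int)
              (if part ≠ [] then st2.1 ++ [off] else st2.1, off))
            (st.1 ++ [off0], off0)
          (inner.1, st.2 + (cs.length : Int)))
    ([], max translate_by 0)).1

-- ===== PRECONDITION & SPEC =====
def Spec_new_line_positions (lines : List String) (translate_by : Int) (out : List Int) : Prop := out = new_line_positions_alt lines translate_by
instance (lines : List String) (translate_by : Int) (out : List Int) : Decidable (Spec_new_line_positions lines translate_by out) := by unfold Spec_new_line_positions; infer_instance

-- ===== CLAIM (what is proved, stated in full; the proofs are below) =====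
def Claim_equal_new_line_positions : Prop := ∀ (lines : List String) (translate_by : Int), Dom_new_line_positions lines translate_by → Spec_new_line_positions lines translate_by (new_line_positions lines translate_by)

-- ===== LEMMAS AND PROOFS =====

-- common reference: positions of newlines not preceded by a newline, scanned left to right
def nlSpec (cs : List Char) (i : Int) (prev : Option Char) : List Int :=
  match cs with
  | [] => []
  | c :: rest => (if c = '\n' ∧ prev ≠ some '\n' then [i] else []) ++ nlSpec rest (i + 1) (some c)

-- structural recursion computing line.split('\n') with a current-part accumulator
def splitAux : List Char → List Char → List (List Char)
  | [], cur => [cur.reverse]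
  | c :: rest, cur => if c = '\n' then cur.reverse :: splitAux rest [] else splitAux rest (c :: cur)

-- B's inner loop over rest[:-1], as a function of the parts list and the running offset
def procRest : List (List Char) → Int → List Int
  | [], _ => []
  | p :: ps, off => (if p ≠ [] then [off + 1 + (p.length : Int)] else []) ++ procRest ps (off + 1 + (p.length : Int))

-- B's whole per-line computation as a function of the parts list and the line's base offset
def procFirst : List (List Char) → Int → List Int
  | [], _ => []
  | first :: rest, base =>
    if rest = [] then [] else (base + (first.length : Int)) :: procRest rest.dropLast (base + (first.length : Int))

theorem splitAux_ne_nil (cs : List Char) : ∀ (cur : List Char), splitAux cs cur ≠ [] := by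
  induction cs with
  | nil => intro cur; simp [splitAux]
  | cons c rest ih =>
    intro cur
    by_cases hc : c = '\n' <;> simp [splitAux, hc, ih]

theorem go_eq (fuel : Nat) : ∀ (cs cur : List Char) (acc : List (List Char)), cs.length ≤ fuel →
    PySem.Chars.splitOn.go ['\n'] fuel cs cur acc = acc.reverse ++ splitAux cs cur := by
  induction fuel with
  | zero =>
    intro cs cur acc h
    have : cs = [] := by cases cs <;> simp_all
    subst this
    simp [PySem.Chars.splitOn.go, splitAux]
  | succ f ih =>
    intro cs cur acc h
    cases cs with
    | nil => simp [PySem.Chars.splitOn.go, splitAux]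
    | cons c rest =>
      rw [PySem.Chars.splitOn.go]
      by_cases hc : c = '\n'
      · subst hc
        have hp : List.isPrefixOf ['\n'] ('\n' :: rest) = true := by simp [List.isPrefixOf]
        simp only [hp, if_pos, List.length_cons, List.length_nil, List.drop_succ_cons, List.drop_zero]
        rw [ih rest [] (cur.reverse :: acc) (by simpa using Nat.le_of_succ_le_succ h)]
        simp [splitAux]
      · have hp : List.isPrefixOf ['\n'] (c :: rest) = false := by
          simp [List.isPrefixOf]; exact fun h' => hc h'.symm
        simp only [hp]
        rw [ih rest (c :: cur) acc (by simpa using Nat.le_of_succ_le_succ h)]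
        simp [splitAux, hc]

theorem splitOn_eq (cs : List Char) : PySem.Chars.splitOn cs ['\n'] = splitAux cs [] := by
  rw [PySem.Chars.splitOn, go_eq (cs.length + 1) cs [] [] (by omega)]
  rfl

theorem procRest_eq (cs : List Char) : ∀ (cur : List Char) (j : Int) (prev : Option Char),
    ((prev = some '\n') ↔ (cur = [])) →
    procRest ((splitAux cs cur).dropLast) (j - cur.length - 1) = nlSpec cs j prev := by
  induction cs with
  | nil =>
    intro cur j prev _
    simp [splitAux, procRest, nlSpec]
  | cons c rest ih =>
    intro cur j prev hiff
    by_cases hc : c = '\n'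
    · subst hc
      obtain ⟨p, ps, hps⟩ : ∃ p ps, splitAux rest [] = p :: ps := by
        cases h : splitAux rest [] with
        | nil => exact absurd h (splitAux_ne_nil rest [])
        | cons p ps => exact ⟨p, ps, rfl⟩
      rw [show splitAux ('\n' :: rest) cur = cur.reverse :: splitAux rest [] from by
        simp [splitAux]]
      rw [hps]
      rw [show (cur.reverse :: p :: ps).dropLast = cur.reverse :: (p :: ps).dropLast from by
        simp]
      rw [show procRest (cur.reverse :: (p :: ps).dropLast) (j - cur.length - 1)
          = (if cur.reverse ≠ [] then [j - (cur.length : Int) - 1 + 1 + (cur.reverse.length : Int)] else [])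
            ++ procRest ((p :: ps).dropLast) (j - (cur.length : Int) - 1 + 1 + (cur.reverse.length : Int))
          from rfl]
      have hoff : j - (cur.length : Int) - 1 + 1 + ((cur.reverse).length : Int) = j := by
        simp only [List.length_reverse]; omega
      rw [hoff]
      have htail : procRest ((p :: ps).dropLast) j = nlSpec rest (j + 1) (some '\n') := by
        have := ih [] (j + 1) (some '\n') (by simp)
        rw [hps] at this
        have harith : (j + 1) - (([] : List Char).length : Int) - 1 = j := by simp
        rw [harith] at this
        exact this
      rw [htail]
      rw [show nlSpec ('\n' :: rest) j prev
          = (if '\n' = '\n' ∧ prev ≠ some '\n' then [j] else []) ++ nlSpec rest (j + 1) (some '\n')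
          from rfl]
      congr 1
      by_cases hcur : cur = []
      · have hp : prev = some '\n' := hiff.mpr hcur
        subst hcur
        simp [hp]
      · have hp : prev ≠ some '\n' := fun h => hcur (hiff.mp h)
        have hcr : cur.reverse ≠ [] := by simpa using hcur
        simp [hcr, hp]
    · have hcc : (c :: cur) ≠ [] := by simp
      have hstep := ih (c :: cur) (j + 1) (some c) (by
        constructor
        · intro h
          exact absurd (Option.some.inj h) hc
        · intro h
          exact absurd h hcc)
      rw [show splitAux (c :: rest) cur = splitAux rest (c :: cur) from by
        simp [splitAux, hc]]
      have harith : (j + 1) - (((c :: cur) : List Char).length : Int) - 1 = j - (cur.length : Int) - 1 := by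
        push_cast [List.length_cons]; omega
      rw [harith] at hstep
      rw [hstep]
      rw [show nlSpec (c :: rest) j prev
          = (if c = '\n' ∧ prev ≠ some '\n' then [j] else []) ++ nlSpec rest (j + 1) (some c)
          from rfl]
      simp [hc]

theorem procFirst_eq (cs : List Char) : ∀ (cur : List Char) (off : Int) (prev : Option Char),
    prev ≠ some '\n' →
    procFirst (splitAux cs cur) (off - cur.length) = nlSpec cs off prev := by
  induction cs with
  | nil =>
    intro cur off prev _
    simp [splitAux, procFirst, nlSpec]
  | cons c rest ih =>
    intro cur off prev hprev
    by_cases hc : c = '\n'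
    · subst hc
      have hne := splitAux_ne_nil rest []
      rw [show splitAux ('\n' :: rest) cur = cur.reverse :: splitAux rest [] from by
        simp [splitAux]]
      rw [show procFirst (cur.reverse :: splitAux rest []) (off - cur.length)
          = if splitAux rest [] = [] then []
            else (off - (cur.length : Int) + ((cur.reverse).length : Int))
              :: procRest (splitAux rest []).dropLast (off - (cur.length : Int) + ((cur.reverse).length : Int))
          from rfl]
      rw [if_neg hne]
      have hbase : off - (cur.length : Int) + ((cur.reverse).length : Int) = off := by
        simp only [List.length_reverse]; omega
      rw [hbase]
      have htail : procRest (splitAux rest []).dropLast off = nlSpec rest (off + 1) (some '\n') := by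
        have := procRest_eq rest [] (off + 1) (some '\n') (by simp)
        have harith : (off + 1) - (([] : List Char).length : Int) - 1 = off := by simp
        rw [harith] at this
        exact this
      rw [htail]
      rw [show nlSpec ('\n' :: rest) off prev
          = (if '\n' = '\n' ∧ prev ≠ some '\n' then [off] else []) ++ nlSpec rest (off + 1) (some '\n')
          from rfl]
      simp [hprev]
    · have hstep := ih (c :: cur) (off + 1) (some c) (by
        intro h
        exact absurd (Option.some.inj h) hc)
      rw [show splitAux (c :: rest) cur = splitAux rest (c :: cur) from by
        simp [splitAux, hc]]
      have harith : (off + 1) - (((c :: cur) : List Char).length : Int) = off - (cur.length : Int) := by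
        push_cast [List.length_cons]; omega
      rw [harith] at hstep
      rw [hstep]
      rw [show nlSpec (c :: rest) off prev
          = (if c = '\n' ∧ prev ≠ some '\n' then [off] else []) ++ nlSpec rest (off + 1) (some c)
          from rfl]
      simp [hc]

-- A's inner per-character fold produces nlSpec and advances the counter by the length
theorem innerA_eq (cs : List Char) : ∀ (pos : List Int) (i : Int) (prev : Option Char),
    (cs.foldl
      (fun (st2 : List Int × Int × Option Char) ch =>
        let pos := if ch = '\n' ∧ st2.2.2 ≠ some '\n' then st2.1 ++ [st2.2.1] else st2.1
        (pos, st2.2.1 + 1, some ch))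
      (pos, i, prev)).1 = pos ++ nlSpec cs i prev ∧
    (cs.foldl
      (fun (st2 : List Int × Int × Option Char) ch =>
        let pos := if ch = '\n' ∧ st2.2.2 ≠ some '\n' then st2.1 ++ [st2.2.1] else st2.1
        (pos, st2.2.1 + 1, some ch))
      (pos, i, prev)).2.1 = i + cs.length := by
  induction cs with
  | nil => intro pos i prev; simp [nlSpec]
  | cons c rest ih =>
    intro pos i prev
    by_cases h : c = '\n' ∧ prev ≠ some '\n' <;>
      simp only [List.foldl_cons, h, if_neg, not_false_iff] <;>
      obtain ⟨h1, h2⟩ := ih (if c = '\n' ∧ prev ≠ some '\n' then pos ++ [i] else pos) (i + 1) (some c) <;>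
      simp [h, nlSpec] at h1 h2 ⊢ <;>
      constructor <;> simp [h1, h2] <;> omega

-- B's inner fold over the middle parts produces procRest
theorem innerB_eq (ps : List (List Char)) : ∀ (pos : List Int) (off : Int),
    (ps.foldl
      (fun (st2 : List Int × Int) part =>
        let off := st2.2 + 1 + (part.length : Int)
        (if part ≠ [] then st2.1 ++ [off] else st2.1, off))
      (pos, off)).1 = pos ++ procRest ps off := by
  induction ps with
  | nil => intro pos off; simp [procRest]
  | cons p rest ih =>
    intro pos off
    by_cases hp : p = [] <;>
      simp only [List.foldl_cons, hp, ne_eq, not_true_eq_false, not_false_iff, if_neg, if_pos,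
        ite_false, ite_true] <;>
      rw [ih] <;> simp [procRest, hp]

-- B's per-line step appends procFirst of the parts
theorem lineB_eq (line : String) (st : List Int × Int) :
    ((match PySem.Chars.splitOn line.toList ['\n'] with
      | [] => (st.1, st.2 + (line.toList.length : Int))
      | first :: rest =>
        if rest = [] then (st.1, st.2 + (line.toList.length : Int))
        else
          let off0 := st.2 + (first.length : Int)
          let inner := rest.dropLast.foldl
            (fun (st2 : List Int × Int) part =>
              let off := st2.2 + 1 + (part.length : Int)
              (if part ≠ [] then st2.1 ++ [off] else st2.1, off))
            (st.1 ++ [off0], off0)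
          (inner.1, st.2 + (line.toList.length : Int))) : List Int × Int)
    = (st.1 ++ nlSpec line.toList st.2 none, st.2 + (line.toList.length : Int)) := by
  have hspec : nlSpec line.toList st.2 none
      = procFirst (splitAux line.toList []) st.2 := by
    have := procFirst_eq line.toList [] st.2 none (by simp)
    simp only [List.length_nil, Nat.cast_zero, sub_zero] at this
    exact this.symm
  rw [splitOn_eq]
  cases h : splitAux line.toList [] with
  | nil => exact absurd h (splitAux_ne_nil line.toList [])
  | cons first rest =>
    rw [h] at hspec
    dsimp only
    by_cases hr : rest = []
    · subst hr
      simp only [if_pos rfl]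
      rw [hspec]
      simp [procFirst]
    · rw [if_neg hr]
      rw [innerB_eq]
      rw [hspec]
      simp [procFirst, hr]

-- the two outer folds agree from any common state
theorem fold_eq (lines : List String) : ∀ (st : List Int × Int),
    lines.foldl
      (fun (st : List Int × Int) line =>
        let inner := line.toList.foldl
          (fun (st2 : List Int × Int × Option Char) ch =>
            let pos := if ch = '\n' ∧ st2.2.2 ≠ some '\n' then st2.1 ++ [st2.2.1] else st2.1
            (pos, st2.2.1 + 1, some ch))
          (st.1, st.2, none)
        (inner.1, inner.2.1)) st
    = lines.foldl
      (fun (st : List Int × Int) line =>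
        let cs := line.toList
        match PySem.Chars.splitOn cs ['\n'] with
        | [] => (st.1, st.2 + (cs.length : Int))
        | first :: rest =>
          if rest = [] then (st.1, st.2 + (cs.length : Int))
          else
            let off0 := st.2 + (first.length : Int)
            let inner := rest.dropLast.foldl
              (fun (st2 : List Int × Int) part =>
                let off := st2.2 + 1 + (part.length : Int)
                (if part ≠ [] then st2.1 ++ [off] else st2.1, off))
              (st.1 ++ [off0], off0)
            (inner.1, st.2 + (cs.length : Int))) st := by
  induction lines with
  | nil => intro st; rfl
  | cons line rest ih =>
    intro st
    simp only [List.foldl_cons]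
    obtain ⟨h1, h2⟩ := innerA_eq line.toList st.1 st.2 none
    rw [ih]
    congr 1
    rw [lineB_eq line st]
    exact Prod.ext (by rw [h1]) (by rw [h2])

-- ===== VERDICT (by name: the statement is the Claim_ definition above) =====
theorem new_line_positions_spec : Claim_equal_new_line_positions := by
  intro lines translate_by _
  unfold Spec_new_line_positions new_line_positions new_line_positions_alt
  rw [fold_eq]
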